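-- pv_equiv track=rewrite | github.com/tgg12321/BushidoBladeDecompile | tools/check_cluster.py | walk_neighbors
-- ===== SOURCE A (Python) =====
-- from collections import defaultdict, deque
--
-- def walk_neighbors(seed: str, graph: dict[str, set[str]], depth: int) -> set[str]:
--     if depth <= 0:
--         return set()
--     visited: set[str] = set()
--     queue = deque([(seed, 0)])
--     while queue:
--         node, dist = queue.popleft()
--         if dist >= depth:
--             continue
--         for neighbor in sorted(graph.get(node, ())):
--             if neighbor in visited or neighbor == seed:
--                 continue
--             visited.add(neighbor)
--             queue.append((neighbor, dist + 1))
--     return visited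
-- ===== SOURCE B (Python) =====
-- def walk_neighbors(seed: str, graph: dict[str, set[str]], depth: int) -> set[str]:
--     visited: set[str] = set()
--     for _ in range(depth):
--         size = len(visited)
--         for node in (seed, *visited):
--             for nb in sorted(graph.get(node, ())):
--                 if nb != seed:
--                     visited.add(nb)
--         if len(visited) == size:
--             break
--     return visited
-- ===== Notes on version B (the rewrite author's own statement) =====
-- stated objective: simpler
-- what changed: Replaced the deque BFS with per-node distance tags by naive fixpoint iteration: each of up to depth rounds re-expands seed together with the entire visited set and stops as soon as visited stops growing; there is no queue, no frontier, no distance bookkeeping and no membership guard before add.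
import Mathlib
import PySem

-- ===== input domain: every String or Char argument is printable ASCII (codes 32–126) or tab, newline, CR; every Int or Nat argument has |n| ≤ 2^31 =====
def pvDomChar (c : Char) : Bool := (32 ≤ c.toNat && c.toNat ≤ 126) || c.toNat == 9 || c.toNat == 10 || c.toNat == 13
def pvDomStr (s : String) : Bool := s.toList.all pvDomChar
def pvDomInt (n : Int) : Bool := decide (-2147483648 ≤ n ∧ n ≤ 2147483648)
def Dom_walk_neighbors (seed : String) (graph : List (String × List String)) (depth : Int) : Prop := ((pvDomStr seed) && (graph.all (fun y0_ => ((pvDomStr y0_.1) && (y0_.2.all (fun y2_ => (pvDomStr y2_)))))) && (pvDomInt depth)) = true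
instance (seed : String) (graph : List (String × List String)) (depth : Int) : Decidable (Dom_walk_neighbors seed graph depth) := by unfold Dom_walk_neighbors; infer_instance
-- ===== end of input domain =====

-- B replaces A's deque BFS with distance tags by naive fixpoint iteration: each of up to
-- depth rounds re-expands seed plus the whole visited set, stopping when it stops growing.

-- ===== PORT A =====
-- sorted(graph.get(node, ())) — this exact expression occurs in both Pythons
def pvNbrs (graph : List (String × List String)) (node : String) : List String :=
  PySem.List.sorted ((PySem.Dict.mk graph).getD node []) (fun x => x) false

-- the while-queue loop of A; fuel only makes the recursion total (it is proved sufficient below)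
def pvALoop (seed : String) (graph : List (String × List String)) (depth : Int) :
    Nat → List (String × Int) → PySem.Set String → PySem.Set String
  | 0, _, visited => visited
  | _ + 1, [], visited => visited
  | f + 1, (node, dist) :: queue, visited =>
    if depth ≤ dist then pvALoop seed graph depth f queue visited
    else
      let st := (pvNbrs graph node).foldl
        (fun st nb =>
          if PySem.Set.contains st.1 nb || nb == seed then st
          else (PySem.Set.add st.1 nb, st.2 ++ [(nb, dist + 1)]))
        (visited, queue)
      pvALoop seed graph depth f st.2 st.1

def walk_neighbors (seed : String) (graph : List (String × List String)) (depth : Int) : List String :=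
  if depth ≤ 0 then PySem.Set.empty
  else pvALoop seed graph depth (1 + (graph.flatMap Prod.snd).length) [(seed, 0)] PySem.Set.empty

-- ===== PORT B =====
-- innermost loop: for nb in sorted(graph.get(node, ())): if nb != seed: visited.add(nb)
def pvBInner (seed : String) (graph : List (String × List String))
    (v : PySem.Set String) (node : String) : PySem.Set String :=
  (pvNbrs graph node).foldl (fun w nb => if nb == seed then w else PySem.Set.add w nb) v

-- one round: for node in (seed, *visited): … (snapshot of visited)
def pvBRound (seed : String) (graph : List (String × List String))
    (v : PySem.Set String) : PySem.Set String :=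
  (seed :: v).foldl (pvBInner seed graph) v

-- 'for _ in range(depth)' with 'if len(visited) == size: break'
def pvBLoop (seed : String) (graph : List (String × List String)) :
    Nat → PySem.Set String → PySem.Set String
  | 0, v => v
  | k + 1, v =>
    let v' := pvBRound seed graph v
    if v'.length = v.length then v' else pvBLoop seed graph k v'

def walk_neighbors_alt (seed : String) (graph : List (String × List String)) (depth : Int) : List String :=
  pvBLoop seed graph depth.toNat PySem.Set.empty

-- ===== PRECONDITION & SPEC =====
def Spec_walk_neighbors (seed : String) (graph : List (String × List String)) (depth : Int) (out : List String) : Prop := out = walk_neighbors_alt seed graph depth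
instance (seed : String) (graph : List (String × List String)) (depth : Int) (out : List String) : Decidable (Spec_walk_neighbors seed graph depth out) := by unfold Spec_walk_neighbors; infer_instance

-- ===== CLAIM (what is proved, stated in full; the proofs are below) =====
def Claim_equal_walk_neighbors : Prop := ∀ (seed : String) (graph : List (String × List String)) (depth : Int), Dom_walk_neighbors seed graph depth → Spec_walk_neighbors seed graph depth (walk_neighbors seed graph depth)

-- ===== LEMMAS AND PROOFS =====

-- the pure effect of one node's neighbor scan: (new visited, list of freshly added nodes)
def pvStep (seed : String) : List String → PySem.Set String → PySem.Set String × List String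
  | [], v => (v, [])
  | nb :: nbs, v =>
    if PySem.Set.contains v nb || nb == seed then pvStep seed nbs v
    else
      let r := pvStep seed nbs (v ++ [nb])
      (r.1, nb :: r.2)

-- the pure effect of expanding a whole frontier
def pvExp (seed : String) (graph : List (String × List String)) :
    List String → PySem.Set String → PySem.Set String × List String
  | [], v => (v, [])
  | n :: cur, v =>
    let s := pvStep seed (pvNbrs graph n) v
    let r := pvExp seed graph cur s.1
    (r.1, s.2 ++ r.2)

theorem pvSet_add_of_not_mem {v : PySem.Set String} {nb : String} (h : nb ∉ v) :
    PySem.Set.add v nb = v ++ [nb] := by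
  simp [PySem.Set.add, PySem.Set.contains, h]

theorem pvSet_add_of_mem {v : PySem.Set String} {nb : String} (h : nb ∈ v) :
    PySem.Set.add v nb = v := by
  simp [PySem.Set.add, PySem.Set.contains, h]

theorem pvStep_fst (seed : String) (nbs : List String) (v : PySem.Set String) :
    (pvStep seed nbs v).1 = v ++ (pvStep seed nbs v).2 := by
  induction nbs generalizing v with
  | nil => simp [pvStep]
  | cons nb nbs ih =>
    by_cases h : nb ∈ v ∨ nb = seed
    · simpa [pvStep, h] using ih v
    · simp [pvStep, h, ih (v ++ [nb])]

theorem pvStep_not_mem (seed : String) (nbs : List String) (v : PySem.Set String)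
    (a : String) (ha : a ∈ (pvStep seed nbs v).2) : a ∉ v := by
  induction nbs generalizing v with
  | nil => simp [pvStep] at ha
  | cons nb nbs ih =>
    by_cases h : nb ∈ v ∨ nb = seed
    · exact ih v (by simpa [pvStep, h] using ha)
    · simp [pvStep, h] at ha
      rcases ha with rfl | ha
      · exact fun hm => h (Or.inl hm)
      · intro hm
        exact ih (v ++ [nb]) ha (by simp [hm])

theorem pvStep_nodup (seed : String) (nbs : List String) (v : PySem.Set String) :
    (pvStep seed nbs v).2.Nodup := by
  induction nbs generalizing v with
  | nil => simp [pvStep]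
  | cons nb nbs ih =>
    by_cases h : nb ∈ v ∨ nb = seed
    · simpa [pvStep, h] using ih v
    · simp [pvStep, h]
      refine ⟨fun hm => ?_, ih (v ++ [nb])⟩
      exact pvStep_not_mem seed nbs (v ++ [nb]) nb hm (by simp)

theorem pvStep_sub (seed : String) (nbs : List String) (v : PySem.Set String)
    (a : String) (ha : a ∈ (pvStep seed nbs v).2) : a ∈ nbs := by
  induction nbs generalizing v with
  | nil => simp [pvStep] at ha
  | cons nb nbs ih =>
    by_cases h : nb ∈ v ∨ nb = seed
    · exact List.mem_cons_of_mem _ (ih v (by simpa [pvStep, h] using ha))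
    · simp [pvStep, h] at ha
      rcases ha with rfl | ha
      · exact List.mem_cons_self
      · exact List.mem_cons_of_mem _ (ih (v ++ [nb]) ha)

-- a node whose non-seed neighbors are all visited contributes nothing
theorem pvStep_skip (seed : String) (nbs : List String) (v : PySem.Set String)
    (h : ∀ nb ∈ nbs, nb = seed ∨ nb ∈ v) : pvStep seed nbs v = (v, []) := by
  induction nbs with
  | nil => simp [pvStep]
  | cons nb nbs ih =>
    have hnb : nb ∈ v ∨ nb = seed := (h nb List.mem_cons_self).symm.imp id id
    rw [pvStep, if_pos (by simpa [PySem.Set.contains] using hnb)]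
    exact ih (fun a ha => h a (List.mem_cons_of_mem _ ha))

-- every scanned non-seed neighbor is visited afterwards
theorem pvStep_mem_fst (seed : String) (nbs : List String) (v : PySem.Set String)
    (a : String) (ha : a ∈ nbs) (hs : a ≠ seed) : a ∈ (pvStep seed nbs v).1 := by
  induction nbs generalizing v with
  | nil => simp at ha
  | cons nb nbs ih =>
    by_cases h : nb ∈ v ∨ nb = seed
    · rw [pvStep, if_pos (by simpa [PySem.Set.contains] using h)]
      rcases List.mem_cons.mp ha with rfl | ha'
      · rcases h with h | h
        · rw [pvStep_fst]; exact List.mem_append_left _ h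
        · exact absurd h hs
      · exact ih v ha'
    · rw [pvStep, if_neg (by simpa [PySem.Set.contains] using h)]
      rcases List.mem_cons.mp ha with rfl | ha'
      · rw [pvStep_fst]; exact List.mem_append_left _ (by simp)
      · exact ih (v ++ [nb]) ha'

-- A's inner fold in terms of pvStep
theorem pvFoldA_eq (seed : String) (dist : Int) (nbs : List String)
    (v : PySem.Set String) (q : List (String × Int)) :
    nbs.foldl
      (fun st nb =>
        if PySem.Set.contains st.1 nb || nb == seed then st
        else (PySem.Set.add st.1 nb, st.2 ++ [(nb, dist + 1)]))
      (v, q)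
    = ((pvStep seed nbs v).1, q ++ (pvStep seed nbs v).2.map (fun n => (n, dist + 1))) := by
  induction nbs generalizing v q with
  | nil => simp [pvStep]
  | cons nb nbs ih =>
    rw [List.foldl_cons]
    by_cases h : nb ∈ v ∨ nb = seed
    · have hc : (PySem.Set.contains v nb || nb == seed) = true := by
        simpa [PySem.Set.contains] using h
      rw [if_pos hc, ih v q]
      conv_rhs => rw [pvStep]
      rw [if_pos hc]
    · have hcn : ¬((PySem.Set.contains v nb || nb == seed) = true) := by
        simpa [PySem.Set.contains] using h
      have hadd : PySem.Set.add v nb = v ++ [nb] :=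
        pvSet_add_of_not_mem (fun hm => h (Or.inl hm))
      rw [if_neg hcn, hadd, ih (v ++ [nb]) (q ++ [(nb, dist + 1)])]
      conv_rhs => rw [pvStep]
      rw [if_neg hcn]
      simp

-- B's innermost fold in terms of pvStep (B has no membership guard; Set.add is idempotent)
theorem pvFoldInner (seed : String) (nbs : List String) (v : PySem.Set String) :
    nbs.foldl (fun w nb => if nb == seed then w else PySem.Set.add w nb) v
      = (pvStep seed nbs v).1 := by
  induction nbs generalizing v with
  | nil => simp [pvStep]
  | cons nb nbs ih =>
    rw [List.foldl_cons]
    by_cases hs : nb = seed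
    · rw [if_pos (by simp [hs]), ih]
      conv_rhs => rw [pvStep]
      rw [if_pos (by simp [hs])]
    · rw [if_neg (by simp [hs])]
      by_cases hm : nb ∈ v
      · rw [pvSet_add_of_mem hm, ih]
        conv_rhs => rw [pvStep]
        rw [if_pos (by simp [PySem.Set.contains, hm])]
      · rw [pvSet_add_of_not_mem hm, ih]
        conv_rhs => rw [pvStep]
        rw [if_neg (by simp [PySem.Set.contains, hm, hs])]

theorem pvBInner_eq (seed : String) (graph : List (String × List String))
    (v : PySem.Set String) (node : String) :
    pvBInner seed graph v node = (pvStep seed (pvNbrs graph node) v).1 :=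
  pvFoldInner seed (pvNbrs graph node) v

-- folding B's inner scan over a frontier is pvExp's visited component
theorem pvFoldRound (seed : String) (graph : List (String × List String)) :
    ∀ (cur : List String) (v : PySem.Set String),
      cur.foldl (pvBInner seed graph) v = (pvExp seed graph cur v).1 := by
  intro cur
  induction cur with
  | nil => intro v; simp [pvExp]
  | cons n cur ih =>
    intro v
    rw [List.foldl_cons, pvBInner_eq, ih]
    rfl

theorem pvExp_fst (seed : String) (graph : List (String × List String)) :
    ∀ (cur : List String) (v : PySem.Set String),
      (pvExp seed graph cur v).1 = v ++ (pvExp seed graph cur v).2 := by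
  intro cur
  induction cur with
  | nil => intro v; simp [pvExp]
  | cons n cur ih =>
    intro v
    show (pvExp seed graph cur (pvStep seed (pvNbrs graph n) v).1).1
      = v ++ ((pvStep seed (pvNbrs graph n) v).2 ++ (pvExp seed graph cur (pvStep seed (pvNbrs graph n) v).1).2)
    rw [ih, pvStep_fst, List.append_assoc]

theorem pvExp_not_mem (seed : String) (graph : List (String × List String)) :
    ∀ (cur : List String) (v : PySem.Set String) (a : String),
      a ∈ (pvExp seed graph cur v).2 → a ∉ v := by
  intro cur
  induction cur with
  | nil => intro v a ha; simp [pvExp] at ha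
  | cons n cur ih =>
    intro v a ha
    rcases List.mem_append.mp (by simpa [pvExp] using ha) with h | h
    · exact pvStep_not_mem seed _ v a h
    · intro hm
      have h1 := ih (pvStep seed (pvNbrs graph n) v).1 a h
      rw [pvStep_fst] at h1
      exact h1 (List.mem_append_left _ hm)

theorem pvExp_nodup (seed : String) (graph : List (String × List String)) :
    ∀ (cur : List String) (v : PySem.Set String),
      (pvExp seed graph cur v).2.Nodup := by
  intro cur
  induction cur with
  | nil => intro v; simp [pvExp]
  | cons n cur ih =>
    intro v
    show (((pvStep seed (pvNbrs graph n) v).2) ++ _).Nodup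
    rw [List.nodup_append]
    refine ⟨pvStep_nodup seed _ v, ih _, ?_⟩
    intro a ha b hb
    rintro rfl
    have h1 := pvExp_not_mem seed graph cur (pvStep seed (pvNbrs graph n) v).1 a hb
    rw [pvStep_fst] at h1
    exact h1 (List.mem_append_right _ ha)

theorem pvGetD_sub (graph : List (String × List String)) (node a : String)
    (ha : a ∈ (PySem.Dict.mk graph).getD node []) : a ∈ graph.flatMap Prod.snd := by
  induction graph with
  | nil => simp [PySem.Dict.getD, PySem.Dict.get?] at ha
  | cons p rest ih =>
    rw [PySem.Dict.getD_eq_get?_getD] at ha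
    obtain ⟨k, l⟩ := p
    rw [PySem.Dict.get?_mk_cons] at ha
    by_cases hk : (k == node) = true
    · rw [if_pos hk] at ha
      simp only [Option.getD_some] at ha
      exact List.mem_flatMap.mpr ⟨(k, l), List.mem_cons_self, ha⟩
    · rw [if_neg hk] at ha
      rw [← PySem.Dict.getD_eq_get?_getD] at ha
      simp only [List.flatMap_cons]
      exact List.mem_append_right _ (ih ha)

theorem pvNbrs_sub (graph : List (String × List String)) (node a : String)
    (ha : a ∈ pvNbrs graph node) : a ∈ graph.flatMap Prod.snd := by
  unfold pvNbrs at ha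
  rw [PySem.List.mem_sorted] at ha
  exact pvGetD_sub graph node a ha

theorem pvExp_sub (seed : String) (graph : List (String × List String)) :
    ∀ (cur : List String) (v : PySem.Set String) (a : String),
      a ∈ (pvExp seed graph cur v).2 → a ∈ graph.flatMap Prod.snd := by
  intro cur
  induction cur with
  | nil => intro v a ha; simp [pvExp] at ha
  | cons n cur ih =>
    intro v a ha
    rcases List.mem_append.mp (by simpa [pvExp] using ha) with h | h
    · exact pvNbrs_sub graph n a (pvStep_sub seed _ v a h)
    · exact ih _ a h

-- after expanding a frontier, every non-seed neighbor of its nodes is visited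
theorem pvExp_closed (seed : String) (graph : List (String × List String)) :
    ∀ (cur : List String) (v : PySem.Set String) (node : String), node ∈ cur →
      ∀ nb ∈ pvNbrs graph node, nb ≠ seed → nb ∈ (pvExp seed graph cur v).1 := by
  intro cur
  induction cur with
  | nil => intro v node h; simp at h
  | cons n cur ih =>
    intro v node hnode nb hnb hs
    rcases List.mem_cons.mp hnode with rfl | h'
    · show nb ∈ (pvExp seed graph cur (pvStep seed (pvNbrs graph node) v).1).1
      rw [pvExp_fst]
      exact List.mem_append_left _ (pvStep_mem_fst seed _ v nb hnb hs)
    · exact ih (pvStep seed (pvNbrs graph n) v).1 node h' nb hnb hs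

-- B's round on an already-closed prefix q equals the A-style expansion of cur
theorem pvRound_eq (seed : String) (graph : List (String × List String)) :
    ∀ (q cur : List String) (v : PySem.Set String),
      seed :: v = q ++ cur →
      (∀ node ∈ q, ∀ nb ∈ pvNbrs graph node, nb ≠ seed → nb ∈ v) →
      pvBRound seed graph v = (pvExp seed graph cur v).1 := by
  have aux : ∀ (q : List String) (cur : List String) (v : PySem.Set String),
      (∀ node ∈ q, ∀ nb ∈ pvNbrs graph node, nb ≠ seed → nb ∈ v) →
      (q ++ cur).foldl (pvBInner seed graph) v = (pvExp seed graph cur v).1 := by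
    intro q
    induction q with
    | nil => intro cur v _; exact pvFoldRound seed graph cur v
    | cons n q ih =>
      intro cur v hc
      rw [List.cons_append, List.foldl_cons, pvBInner_eq,
        pvStep_skip seed _ v (fun nb hnb => by
          by_cases hs : nb = seed
          · exact Or.inl hs
          · exact Or.inr (hc n List.mem_cons_self nb hnb hs))]
      exact ih cur v (fun node h => hc node (List.mem_cons_of_mem _ h))
  intro q cur v hqc hc
  unfold pvBRound
  rw [hqc]
  exact aux q cur v hc

-- entries at distance ≥ depth are popped and skipped, leaving visited unchanged
theorem pvALoop_skip (seed : String) (graph : List (String × List String)) (depth : Int) :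
    ∀ (ys : List String) (f : Nat) (dist : Int) (v : PySem.Set String), depth ≤ dist →
      pvALoop seed graph depth f (ys.map (fun n => (n, dist))) v = v := by
  intro ys
  induction ys with
  | nil => intro f dist v _; cases f <;> simp [pvALoop]
  | cons y ys ih =>
    intro f dist v hle
    cases f with
    | zero => simp [pvALoop]
    | succ f =>
      simp only [List.map_cons, pvALoop]
      rw [if_pos hle]
      exact ih f dist v hle

theorem pvALoop_nil (seed : String) (graph : List (String × List String)) (depth : Int)
    (f : Nat) (v : PySem.Set String) : pvALoop seed graph depth f [] v = v := by
  cases f <;> simp [pvALoop]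

-- A consumes one whole level of the queue exactly as pvExp does
theorem pvLevelA (seed : String) (graph : List (String × List String)) (depth d : Int)
    (hd : d < depth) :
    ∀ (xs : List String) (f : Nat) (v : PySem.Set String) (ys : List String), xs.length ≤ f →
      pvALoop seed graph depth f (xs.map (fun n => (n, d)) ++ ys.map (fun n => (n, d + 1))) v
        = pvALoop seed graph depth (f - xs.length)
            ((ys ++ (pvExp seed graph xs v).2).map (fun n => (n, d + 1)))
            (pvExp seed graph xs v).1 := by
  intro xs
  induction xs with
  | nil => intro f v ys _; simp [pvExp]
  | cons x xs ih =>
    intro f v ys hf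
    cases f with
    | zero => simp at hf
    | succ f =>
      simp only [List.map_cons, List.cons_append, pvALoop]
      rw [if_neg (not_le.mpr hd)]
      rw [pvFoldA_eq seed d (pvNbrs graph x) v (xs.map (fun n => (n, d)) ++ ys.map (fun n => (n, d + 1)))]
      have hq : (xs.map (fun n => (n, d)) ++ ys.map (fun n => (n, d + 1)))
            ++ (pvStep seed (pvNbrs graph x) v).2.map (fun n => (n, d + 1))
          = xs.map (fun n => (n, d)) ++ (ys ++ (pvStep seed (pvNbrs graph x) v).2).map (fun n => (n, d + 1)) := by
        simp [List.append_assoc]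
      rw [hq]
      rw [ih f (pvStep seed (pvNbrs graph x) v).1 (ys ++ (pvStep seed (pvNbrs graph x) v).2)
        (by simpa using Nat.lt_succ_iff.mp (by simpa using hf))]
      show _ = pvALoop seed graph depth _ ((ys ++ ((pvStep seed (pvNbrs graph x) v).2 ++ (pvExp seed graph xs (pvStep seed (pvNbrs graph x) v).1).2)).map _) _
      simp [pvExp, Nat.succ_sub_succ, List.append_assoc]

-- remaining fuel certificate: nodes of the graph's value lists not yet visited
def pvRem (graph : List (String × List String)) (v : List String) : Nat :=
  ((graph.flatMap Prod.snd).toFinset \ v.toFinset).card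

theorem pvRem_step (graph : List (String × List String)) (v d : List String)
    (hn : d.Nodup) (hg : ∀ a ∈ d, a ∈ graph.flatMap Prod.snd) (hv : ∀ a ∈ d, a ∉ v) :
    d.length + pvRem graph (v ++ d) ≤ pvRem graph v := by
  unfold pvRem
  have hsub : d.toFinset ⊆ (graph.flatMap Prod.snd).toFinset \ v.toFinset := by
    intro a ha
    rw [List.mem_toFinset] at ha
    rw [Finset.mem_sdiff, List.mem_toFinset, List.mem_toFinset]
    exact ⟨hg a ha, hv a ha⟩
  have hset : (graph.flatMap Prod.snd).toFinset \ (v ++ d).toFinset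
      = ((graph.flatMap Prod.snd).toFinset \ v.toFinset) \ d.toFinset := by
    ext a
    simp only [Finset.mem_sdiff, List.mem_toFinset, List.mem_append]
    tauto
  rw [hset, Finset.card_sdiff]
  have hinter : d.toFinset ∩ ((graph.flatMap Prod.snd).toFinset \ v.toFinset) = d.toFinset :=
    Finset.inter_eq_left.mpr hsub
  rw [hinter]
  have hcard : d.toFinset.card = d.length := List.toFinset_card_of_nodup hn
  have hle := Finset.card_le_card hsub
  omega

-- the bisimulation: A's tagged queue run equals B's fixpoint loop
theorem pvRun (seed : String) (graph : List (String × List String)) (depth : Int) :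
    ∀ (k : Nat) (f : Nat) (q cur : List String) (v : PySem.Set String) (d : Int),
      (depth - d).toNat = k → d < depth →
      seed :: v = q ++ cur →
      (∀ node ∈ q, ∀ nb ∈ pvNbrs graph node, nb ≠ seed → nb ∈ v) →
      cur.length + pvRem graph v ≤ f →
      pvALoop seed graph depth f (cur.map (fun n => (n, d))) v = pvBLoop seed graph k v := by
  intro k
  induction k with
  | zero => intro f q cur v d hk hd _ _ _; omega
  | succ k ih =>
    intro f q cur v d hk hd hqc hc hf
    have hlen : cur.length ≤ f := le_trans (Nat.le_add_right _ _) hf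
    have h1 := pvLevelA seed graph depth d hd cur f v [] hlen
    simp only [List.map_nil, List.append_nil, List.nil_append] at h1
    rw [h1]
    have hround : pvBRound seed graph v = (pvExp seed graph cur v).1 :=
      pvRound_eq seed graph q cur v hqc hc
    have hfst := pvExp_fst seed graph cur v
    simp only [pvBLoop]
    by_cases hE : (pvExp seed graph cur v).2 = []
    · rw [if_pos (by rw [hround, hfst, hE]; simp)]
      rw [hE]
      simp only [List.map_nil]
      rw [pvALoop_nil, hround, hfst, hE, List.append_nil]
    · rw [if_neg (by
        rw [hround, hfst, List.length_append]
        have : (pvExp seed graph cur v).2.length ≠ 0 := by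
          simpa [List.length_eq_zero_iff] using hE
        omega)]
      rw [hround]
      by_cases hlt : d + 1 < depth
      · refine ih (f - cur.length) (q ++ cur) (pvExp seed graph cur v).2
          (pvExp seed graph cur v).1 (d + 1) (by omega) hlt ?_ ?_ ?_
        · rw [hfst, ← List.cons_append, hqc, List.append_assoc]
        · intro node hnode nb hnb hs
          rcases List.mem_append.mp hnode with h | h
          · rw [hfst]
            exact List.mem_append_left _ (hc node h nb hnb hs)
          · exact pvExp_closed seed graph cur v node h nb hnb hs
        · have hstep := pvRem_step graph v (pvExp seed graph cur v).2
            (pvExp_nodup seed graph cur v)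
            (fun a ha => pvExp_sub seed graph cur v a ha)
            (fun a ha => pvExp_not_mem seed graph cur v a ha)
          rw [← hfst] at hstep
          omega
      · have hk0 : k = 0 := by omega
        subst hk0
        rw [pvALoop_skip seed graph depth _ _ (d + 1) _ (by omega)]
        rfl

-- ===== VERDICT (by name: the statement is the Claim_ definition above) =====
theorem walk_neighbors_spec : Claim_equal_walk_neighbors := by
  intro seed graph depth _
  unfold Spec_walk_neighbors walk_neighbors walk_neighbors_alt
  by_cases hd : depth ≤ 0
  · rw [if_pos hd]
    have h0 : depth.toNat = 0 := by omega
    rw [h0]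
    rfl
  · rw [if_neg hd]
    have hmap : [((seed : String), (0 : Int))] = [seed].map (fun n => (n, (0 : Int))) := by simp
    rw [hmap]
    refine pvRun seed graph depth depth.toNat _ [] [seed] PySem.Set.empty 0 (by omega) (by omega)
      (by simp [PySem.Set.empty]) (by simp) ?_
    have hle : pvRem graph PySem.Set.empty ≤ (graph.flatMap Prod.snd).length := by
      unfold pvRem
      calc ((graph.flatMap Prod.snd).toFinset \ (PySem.Set.empty : List String).toFinset).card
          ≤ (graph.flatMap Prod.snd).toFinset.card := Finset.card_le_card (Finset.sdiff_subset)
        _ ≤ (graph.flatMap Prod.snd).length := List.toFinset_card_le _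
    simp only [List.length_cons, List.length_nil]
    omega
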